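-- pv_equiv track=rewrite | github.com/drhannahsc-arch/MABE | sampl_adapter.py | _classify_host
-- ===== SOURCE A (Python) =====
-- HOST_METADATA = {
--     # SAMPL6
--     "OA":       {"type": "cavitand",      "full_name": "Octa Acid",
--                  "conditions": "10 mM NaPO4 pH 11.7, 298 K", "doi": "10.1007/s10822-018-0170-6"},
--     "TEMOA":    {"type": "cavitand",      "full_name": "Tetra-endo-methyl Octa Acid",
--                  "conditions": "10 mM NaPO4 pH 11.7, 298 K", "doi": "10.1007/s10822-018-0170-6"},
--     "CB8":      {"type": "cucurbituril",  "full_name": "Cucurbit[8]uril",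
--                  "conditions": "20 mM NaPO4 pH 7.4, 298 K", "doi": "10.1007/s10822-018-0170-6"},
--     # SAMPL7
--     "clip":     {"type": "clip",          "full_name": "TrimerTrip (acyclic CB)",
--                  "conditions": "20 mM NaPO4 pH 7.4, 298 K", "doi": "10.1039/C9NJ05336K"},
--     "OA-sm":    {"type": "cavitand",      "full_name": "Octa Acid (SAMPL7)",
--                  "conditions": "10 mM NaPO4 pH 11.5, 298 K", "doi": "10.1007/s10822-020-00363-5"},
--     "exoOA":    {"type": "cavitand",      "full_name": "exo Octa Acid",
--                  "conditions": "10 mM NaPO4 pH 11.5, 298 K", "doi": "10.1007/s10822-020-00363-5"},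
--     # SAMPL7 CD derivatives
--     "bCD":      {"type": "cyclodextrin",  "full_name": "beta-Cyclodextrin",
--                  "conditions": "25 mM NaPO4 pH 6.8, 298 K", "doi": "10.1007/s10822-020-00363-5"},
--     "MGLab8":   {"type": "cyclodextrin",  "full_name": "MGLab8 (bCD derivative)",
--                  "conditions": "25 mM NaPO4 pH 6.8, 298 K", "doi": "10.1007/s10822-020-00363-5"},
--     # SAMPL9
--     "WP6":      {"type": "pillararene",   "full_name": "Water-soluble Pillar[6]arene",
--                  "conditions": "10 mM NaPO4, 298 K", "doi": "pending"},
--     "HbCD":     {"type": "cyclodextrin",  "full_name": "Hydroxypropyl-beta-CD",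
--                  "conditions": "10 mM NaPO4, 298 K", "doi": "pending"},
-- }
--
-- def _classify_host(system_id: str) -> str:
--     """Extract host name from system ID like 'OA-G2' or 'clip-g5'."""
--     parts = system_id.split("-")
--     if len(parts) >= 2:
--         # Handle cases like "bCD-PMZ", "WP6-G1", "clip-g3"
--         host = parts[0]
--         # Also handle "MGLab8-g1" etc.
--         if host in HOST_METADATA:
--             return host
--         # Try joining first parts for compound host names
--         for i in range(1, len(parts)):
--             candidate = "-".join(parts[:i])
--             if candidate in HOST_METADATA:
--                 return candidate
--     return parts[0]
-- ===== SOURCE B (Python) =====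
-- HOST_METADATA = {
--     "OA":       {"type": "cavitand",      "full_name": "Octa Acid",
--                  "conditions": "10 mM NaPO4 pH 11.7, 298 K", "doi": "10.1007/s10822-018-0170-6"},
--     "TEMOA":    {"type": "cavitand",      "full_name": "Tetra-endo-methyl Octa Acid",
--                  "conditions": "10 mM NaPO4 pH 11.7, 298 K", "doi": "10.1007/s10822-018-0170-6"},
--     "CB8":      {"type": "cucurbituril",  "full_name": "Cucurbit[8]uril",
--                  "conditions": "20 mM NaPO4 pH 7.4, 298 K", "doi": "10.1007/s10822-018-0170-6"},
--     "clip":     {"type": "clip",          "full_name": "TrimerTrip (acyclic CB)",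
--                  "conditions": "20 mM NaPO4 pH 7.4, 298 K", "doi": "10.1039/C9NJ05336K"},
--     "OA-sm":    {"type": "cavitand",      "full_name": "Octa Acid (SAMPL7)",
--                  "conditions": "10 mM NaPO4 pH 11.5, 298 K", "doi": "10.1007/s10822-020-00363-5"},
--     "exoOA":    {"type": "cavitand",      "full_name": "exo Octa Acid",
--                  "conditions": "10 mM NaPO4 pH 11.5, 298 K", "doi": "10.1007/s10822-020-00363-5"},
--     "bCD":      {"type": "cyclodextrin",  "full_name": "beta-Cyclodextrin",
--                  "conditions": "25 mM NaPO4 pH 6.8, 298 K", "doi": "10.1007/s10822-020-00363-5"},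
--     "MGLab8":   {"type": "cyclodextrin",  "full_name": "MGLab8 (bCD derivative)",
--                  "conditions": "25 mM NaPO4 pH 6.8, 298 K", "doi": "10.1007/s10822-020-00363-5"},
--     "WP6":      {"type": "pillararene",   "full_name": "Water-soluble Pillar[6]arene",
--                  "conditions": "10 mM NaPO4, 298 K", "doi": "pending"},
--     "HbCD":     {"type": "cyclodextrin",  "full_name": "Hydroxypropyl-beta-CD",
--                  "conditions": "10 mM NaPO4, 298 K", "doi": "pending"},
-- }
--
-- def _classify_host(system_id: str) -> str:
--     """Extract host name from system ID like 'OA-G2' or 'clip-g5'."""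
--     # Scan the known host names once, keeping the shortest dash-boundary prefix match;
--     # otherwise fall back to the text before the first dash (str.partition).
--     best = None
--     for k in HOST_METADATA:
--         if system_id.startswith(k + "-") and (best is None or len(k) < len(best)):
--             best = k
--     if best is not None:
--         return best
--     return system_id.partition("-")[0]
-- ===== Notes on version B (the rewrite author's own statement) =====
-- stated objective: alternative
-- what changed: Instead of splitting the id and probing the dict with each growing dash-joined prefix, B scans the known host names once, keeping the shortest name that is a dash-boundary prefix of system_id, and falls back to the text before the first dash (str.partition).
import Mathlib
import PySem

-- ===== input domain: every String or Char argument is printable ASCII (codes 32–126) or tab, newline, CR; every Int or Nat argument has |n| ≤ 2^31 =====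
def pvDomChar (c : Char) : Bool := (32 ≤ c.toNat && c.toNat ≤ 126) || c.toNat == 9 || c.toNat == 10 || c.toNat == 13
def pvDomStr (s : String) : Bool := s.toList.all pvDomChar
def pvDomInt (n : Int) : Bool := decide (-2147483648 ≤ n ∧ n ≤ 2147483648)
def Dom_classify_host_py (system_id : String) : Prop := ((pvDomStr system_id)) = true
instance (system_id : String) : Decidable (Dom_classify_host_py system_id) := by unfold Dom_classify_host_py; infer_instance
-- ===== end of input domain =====

-- B replaces A's split-and-probe over growing dash-joined prefixes by a single scan of the
-- known host names keeping the shortest dash-boundary prefix match, with a str.partition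
-- fallback (objective: alternative).

-- ===== PORT A =====
def HOST_METADATA : PySem.Dict String (PySem.Dict String String) := PySem.Dict.ofList [
  ("OA",     PySem.Dict.ofList [("type","cavitand"),("full_name","Octa Acid"),("conditions","10 mM NaPO4 pH 11.7, 298 K"),("doi","10.1007/s10822-018-0170-6")]),
  ("TEMOA",  PySem.Dict.ofList [("type","cavitand"),("full_name","Tetra-endo-methyl Octa Acid"),("conditions","10 mM NaPO4 pH 11.7, 298 K"),("doi","10.1007/s10822-018-0170-6")]),
  ("CB8",    PySem.Dict.ofList [("type","cucurbituril"),("full_name","Cucurbit[8]uril"),("conditions","20 mM NaPO4 pH 7.4, 298 K"),("doi","10.1007/s10822-018-0170-6")]),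
  ("clip",   PySem.Dict.ofList [("type","clip"),("full_name","TrimerTrip (acyclic CB)"),("conditions","20 mM NaPO4 pH 7.4, 298 K"),("doi","10.1039/C9NJ05336K")]),
  ("OA-sm",  PySem.Dict.ofList [("type","cavitand"),("full_name","Octa Acid (SAMPL7)"),("conditions","10 mM NaPO4 pH 11.5, 298 K"),("doi","10.1007/s10822-020-00363-5")]),
  ("exoOA",  PySem.Dict.ofList [("type","cavitand"),("full_name","exo Octa Acid"),("conditions","10 mM NaPO4 pH 11.5, 298 K"),("doi","10.1007/s10822-020-00363-5")]),
  ("bCD",    PySem.Dict.ofList [("type","cyclodextrin"),("full_name","beta-Cyclodextrin"),("conditions","25 mM NaPO4 pH 6.8, 298 K"),("doi","10.1007/s10822-020-00363-5")]),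
  ("MGLab8", PySem.Dict.ofList [("type","cyclodextrin"),("full_name","MGLab8 (bCD derivative)"),("conditions","25 mM NaPO4 pH 6.8, 298 K"),("doi","10.1007/s10822-020-00363-5")]),
  ("WP6",    PySem.Dict.ofList [("type","pillararene"),("full_name","Water-soluble Pillar[6]arene"),("conditions","10 mM NaPO4, 298 K"),("doi","pending")]),
  ("HbCD",   PySem.Dict.ofList [("type","cyclodextrin"),("full_name","Hydroxypropyl-beta-CD"),("conditions","10 mM NaPO4, 298 K"),("doi","pending")])]

-- A's "for i in range(1, len(parts)): … return candidate" loop (early return = some)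
def classifyLoop (parts : List String) (i : Nat) : Option String :=
  if _h : i < parts.length then
    let candidate := PySem.Str.join "-" (parts.take i)
    if HOST_METADATA.contains candidate then some candidate
    else classifyLoop parts (i+1)
  else none
termination_by parts.length - i

def classify_host_py (system_id : String) : String :=
  let parts : List String := (PySem.Chars.splitOn system_id.toList ['-']).map String.ofList
  if 2 ≤ parts.length then
    let host := parts.headD ""
    if HOST_METADATA.contains host then host
    else
      match classifyLoop parts 1 with
      | some c => c
      | none => parts.headD ""
  else parts.headD ""

-- ===== PORT B =====
-- "for k in HOST_METADATA" iterates the dict's keys, in insertion order: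
def HOSTS : List String := ["OA","TEMOA","CB8","clip","OA-sm","exoOA","bCD","MGLab8","WP6","HbCD"]

-- "best is None or len(k) < len(best)"
def improves (k : String) (best : Option String) : Bool :=
  match best with
  | none => true
  | some b => PySem.Str.len k < PySem.Str.len b

def classify_host_py_alt (system_id : String) : String :=
  let best := HOSTS.foldl
    (fun best k =>
      if PySem.Str.startswith system_id (k ++ "-") && improves k best then some k else best)
    none
  match best with
  | some b => b
  -- the first component of str.partition on the dash = the characters before the first dash (exact: takeWhile)
  | none => String.ofList (system_id.toList.takeWhile (fun c => c != '-'))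

-- ===== PRECONDITION & SPEC =====
def Spec_classify_host_py (system_id : String) (out : String) : Prop := out = classify_host_py_alt system_id
instance (system_id : String) (out : String) : Decidable (Spec_classify_host_py system_id out) := by unfold Spec_classify_host_py; infer_instance

-- ===== CLAIM (what is proved, stated in full; the proofs are below) =====
def Claim_equal_classify_host_py : Prop := ∀ (system_id : String), Dom_classify_host_py system_id → Spec_classify_host_py system_id (classify_host_py system_id)

-- ===== LEMMAS AND PROOFS =====

lemma contains_iff (c : String) : HOST_METADATA.contains c = true ↔ c ∈ HOSTS := by
  rw [PySem.Dict.contains_iff_mem_keys]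
  constructor <;> (intro h; revert h)
  · exact fun h => by simpa [show HOST_METADATA.keys = HOSTS from by decide] using h
  · exact fun h => by simpa [show HOST_METADATA.keys = HOSTS from by decide] using h

-- specification-side model of Python's s.split("-")
def mysplit : List Char → List Char → List (List Char)
  | cur, [] => [cur]
  | cur, c :: rest => if c = '-' then cur :: mysplit [] rest else mysplit (cur ++ [c]) rest

lemma splitOn_go_eq (fuel : Nat) (l cur : List Char) (acc : List (List Char))
    (h : l.length < fuel) :
    PySem.Chars.splitOn.go ['-'] fuel l cur acc = acc.reverse ++ mysplit cur.reverse l := by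
  induction fuel generalizing l cur acc with
  | zero => omega
  | succ fuel ih =>
    cases l with
    | nil => rw [PySem.Chars.splitOn.go] <;> simp [mysplit]
    | cons c rest =>
      rw [PySem.Chars.splitOn.go]
      by_cases hc : c = '-'
      · subst hc
        simp only [List.isPrefixOf, BEq.refl, Bool.true_and, if_pos, List.length_cons,
          List.drop_succ_cons]
        rw [ih _ _ _ (by simpa using Nat.lt_of_succ_lt_succ h)]
        simp [mysplit]
      · have hpre : List.isPrefixOf ['-'] (c :: rest) = false := by
          simp [List.isPrefixOf]; exact fun h' => (hc h'.symm).elim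
        rw [hpre]
        simp only [Bool.false_eq_true, if_false]
        rw [ih _ _ _ (by simpa using Nat.lt_of_succ_lt_succ h)]
        simp [mysplit, hc]

lemma splitOn_dash_eq (cs : List Char) :
    PySem.Chars.splitOn cs ['-'] = mysplit [] cs := by
  rw [PySem.Chars.splitOn, splitOn_go_eq _ _ _ _ (Nat.lt_succ_self _)]
  simp

lemma mysplit_ne_nil (cur l : List Char) : mysplit cur l ≠ [] := by
  induction l generalizing cur with
  | nil => simp [mysplit]
  | cons c rest ih => by_cases hc : c = '-' <;> simp [mysplit, hc, ih]

lemma head_mysplit (cur l : List Char) :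
    (mysplit cur l).headD [] = cur ++ l.takeWhile (fun c => c != '-') := by
  induction l generalizing cur with
  | nil => simp [mysplit]
  | cons c rest ih =>
    by_cases hc : c = '-'
    · subst hc; simp [mysplit, List.takeWhile]
    · simp only [mysplit, if_neg hc]
      rw [ih]
      simp [hc]

lemma join_mysplit (cur l : List Char) :
    PySem.Chars.join ['-'] (mysplit cur l) = cur ++ l := by
  induction l generalizing cur with
  | nil => simp [mysplit, PySem.Chars.join, List.intercalate]
  | cons c rest ih =>
    by_cases hc : c = '-'
    · subst hc
      have hne := mysplit_ne_nil [] rest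
      simp only [mysplit]
      cases hm : mysplit [] rest with
      | nil => exact absurd hm hne
      | cons p ps =>
        have := ih ([])
        rw [hm] at this
        simp [PySem.Chars.join, List.intercalate] at this ⊢
        simpa using this
    · simp only [mysplit, if_neg hc]
      rw [ih]
      simp

lemma dash_free_mysplit (cur l : List Char) (hcur : '-' ∉ cur) :
    ∀ p ∈ mysplit cur l, '-' ∉ p := by
  induction l generalizing cur with
  | nil => simpa [mysplit] using hcur
  | cons c rest ih =>
    by_cases hc : c = '-'
    · subst hc
      simp only [mysplit]
      intro p hp
      rcases List.mem_cons.mp hp with rfl | hp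
      · exact hcur
      · exact ih [] (by simp) p hp
    · simp only [mysplit, if_neg hc]
      refine ih (cur ++ [c]) ?_
      simp only [List.mem_append, List.mem_singleton]
      rintro (h | h)
      · exact hcur h
      · exact hc h.symm

lemma join_split_at (P : List (List Char)) (i : Nat) (h1 : 0 < i) (h2 : i < P.length) :
    PySem.Chars.join ['-'] P =
      PySem.Chars.join ['-'] (P.take i) ++ '-' :: PySem.Chars.join ['-'] (P.drop i) := by
  induction P generalizing i with
  | nil => simp at h2
  | cons p P ih =>
    cases i with
    | zero => omega
    | succ i =>
      cases Nat.eq_zero_or_pos i with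
      | inl hz =>
        subst hz
        have hP : P ≠ [] := by
          intro h; rw [h] at h2; simp at h2
        cases P with
        | nil => simp at h2
        | cons q Q => simp [PySem.Chars.join, List.intercalate]
      | inr hpos =>
        have h2' : i < P.length := by simpa using Nat.lt_of_succ_lt_succ h2
        have hP : P ≠ [] := by intro h; rw [h] at h2'; simp at h2'
        have hTake : P.take i ≠ [] := by
          intro h
          rcases List.take_eq_nil_iff.mp h with h' | h'
          · omega
          · rw [h'] at h2'; simp at h2'
        cases P with
        | nil => exact absurd rfl hP
        | cons q Q =>
          have := ih (i := i) hpos h2'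
          simp only [List.take_succ_cons, List.drop_succ_cons]
          cases ht : (q :: Q).take i with
          | nil => exact absurd ht hTake
          | cons r R =>
            rw [ht] at this
            simp [PySem.Chars.join, List.intercalate] at this ⊢
            simp [this]

lemma prefix_of_join (P : List (List Char)) (i : Nat) (h1 : 0 < i) (h2 : i < P.length) :
    PySem.Chars.join ['-'] (P.take i) ++ ['-'] <+: PySem.Chars.join ['-'] P := by
  rw [join_split_at P i h1 h2]
  exact ⟨PySem.Chars.join ['-'] (P.drop i), by simp⟩

lemma join_of_prefix (P : List (List Char)) (t : List Char)
    (hf : ∀ p ∈ P, '-' ∉ p)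
    (h : t ++ ['-'] <+: PySem.Chars.join ['-'] P) :
    ∃ i, 1 ≤ i ∧ i < P.length ∧ t = PySem.Chars.join ['-'] (P.take i) := by
  induction P generalizing t with
  | nil =>
    exfalso
    have := h.length_le
    simp at this
  | cons p P ih =>
    cases P with
    | nil =>
      exfalso
      have hsub : '-' ∈ p := by
        have hm : '-' ∈ t ++ ['-'] := by simp
        have hmem := h.subset hm
        simpa [PySem.Chars.join, List.intercalate] using hmem
      exact hf p (by simp) hsub
    | cons q Q =>
      have hjoin : PySem.Chars.join ['-'] (p :: q :: Q) =
          p ++ '-' :: PySem.Chars.join ['-'] (q :: Q) := by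
        simp [PySem.Chars.join, List.intercalate]
      rw [hjoin] at h
      have hpw : p <+: p ++ '-' :: PySem.Chars.join ['-'] (q :: Q) := List.prefix_append p _
      have htw : t <+: p ++ '-' :: PySem.Chars.join ['-'] (q :: Q) :=
        (List.prefix_append t ['-']).trans h
      rcases Nat.lt_trichotomy t.length p.length with hlt | heq | hgt
      · exfalso
        have hpre : t ++ ['-'] <+: p :=
          List.prefix_of_prefix_length_le h hpw (by simp; omega)
        exact hf p (by simp) (hpre.subset (by simp))
      · -- t = p, i = 1
        have ht : t = p :=
          (List.prefix_of_prefix_length_le htw hpw (le_of_eq heq)).eq_of_length heq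
        exact ⟨1, le_refl 1, by simp, by simpa [PySem.Chars.join, List.intercalate] using ht⟩
      · -- t extends past p: t = p ++ '-' :: t'' and recurse
        have hp : p <+: t := List.prefix_of_prefix_length_le hpw htw (le_of_lt hgt)
        rcases hp with ⟨t', rfl⟩
        have hu' : t' ++ ['-'] <+: '-' :: PySem.Chars.join ['-'] (q :: Q) := by
          rw [List.append_assoc] at h
          exact (List.prefix_append_right_inj p).mp h
        cases t' with
        | nil => exfalso; simp at hgt
        | cons d t'' =>
          rw [List.cons_append, List.cons_prefix_cons] at hu'
          obtain ⟨rfl, hrec⟩ := hu'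
          rcases ih t'' (fun r hr => hf r (List.mem_cons_of_mem _ hr)) hrec with ⟨i, hi1, hi2, hi3⟩
          refine ⟨i + 1, by omega, by simpa using Nat.succ_lt_succ hi2, ?_⟩
          have htake : ((p :: q :: Q).take (i+1)) = p :: ((q :: Q).take i) := by simp
          rw [htake]
          have hne : (q :: Q).take i ≠ [] := by
            intro hq
            rcases List.take_eq_nil_iff.mp hq with h' | h'
            · omega
            · simp at h'
          cases hti : (q :: Q).take i with
          | nil => exact absurd hti hne
          | cons r R =>
            rw [hti] at hi3
            rw [hi3]
            simp [PySem.Chars.join, List.intercalate]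

lemma join_take_len_lt (P : List (List Char)) (i j : Nat)
    (h1 : 1 ≤ i) (h2 : i < j) (h3 : j ≤ P.length) :
    (PySem.Chars.join ['-'] (P.take i)).length < (PySem.Chars.join ['-'] (P.take j)).length := by
  have hsplit := join_split_at (P.take j) i (by omega) (by simp; omega)
  rw [List.take_take, min_eq_left (by omega)] at hsplit
  rw [hsplit]
  simp

lemma classifyLoop_none (parts : List String) (i : Nat)
    (h : ∀ j, i ≤ j → j < parts.length →
      HOST_METADATA.contains (PySem.Str.join "-" (parts.take j)) = false) :
    classifyLoop parts i = none := by
  rw [classifyLoop]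
  split
  · next hi =>
    show (if HOST_METADATA.contains (PySem.Str.join "-" (parts.take i)) = true
        then some (PySem.Str.join "-" (parts.take i)) else classifyLoop parts (i+1)) = none
    rw [h i (le_refl i) hi]
    simp only [Bool.false_eq_true, if_false]
    exact classifyLoop_none parts (i+1) (fun j hj1 hj2 => h j (by omega) hj2)
  · rfl
termination_by parts.length - i

lemma classifyLoop_find (parts : List String) (i i₀ : Nat)
    (hle : i ≤ i₀) (hlt : i₀ < parts.length)
    (hhit : HOST_METADATA.contains (PySem.Str.join "-" (parts.take i₀)) = true)
    (hmin : ∀ j, i ≤ j → j < i₀ →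
      HOST_METADATA.contains (PySem.Str.join "-" (parts.take j)) = false) :
    classifyLoop parts i = some (PySem.Str.join "-" (parts.take i₀)) := by
  rw [classifyLoop]
  split
  · next hi =>
    show (if HOST_METADATA.contains (PySem.Str.join "-" (parts.take i)) = true
        then some (PySem.Str.join "-" (parts.take i)) else classifyLoop parts (i+1)) =
      some (PySem.Str.join "-" (parts.take i₀))
    by_cases hcase : i = i₀
    · subst hcase
      rw [hhit]
      simp
    · rw [hmin i (le_refl i) (by omega)]
      simp only [Bool.false_eq_true, if_false]
      exact classifyLoop_find parts (i+1) i₀ (by omega) hlt hhit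
        (fun j hj1 hj2 => hmin j (by omega) hj2)
  · omega
termination_by parts.length - i

lemma fold_none (cond : String → Bool) (ks : List String) (b : Option String)
    (h : ∀ k ∈ ks, cond k = false) :
    ks.foldl (fun best k => if cond k && improves k best then some k else best) b = b := by
  induction ks generalizing b with
  | nil => rfl
  | cons k ks ih =>
    simp only [List.foldl_cons, h k (by simp), Bool.false_and, Bool.false_eq_true, if_false]
    exact ih b (fun k' hk' => h k' (by simp [hk']))

lemma fold_keep (cond : String → Bool) (ks : List String) (t : String)
    (h : ∀ k ∈ ks, cond k = true → ¬(PySem.Str.len k < PySem.Str.len t)) :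
    ks.foldl (fun best k => if cond k && improves k best then some k else best) (some t) = some t := by
  induction ks with
  | nil => rfl
  | cons k ks ih =>
    rw [List.foldl_cons]
    have hck : (cond k && improves k (some t)) = false := by
      cases hcb : cond k with
      | false => rfl
      | true =>
        rw [Bool.true_and]
        show decide (PySem.Str.len k < PySem.Str.len t) = false
        exact decide_eq_false (h k (by simp) hcb)
    rw [hck]
    simp only [Bool.false_eq_true, if_false]
    exact ih (fun k' hk' => h k' (by simp [hk']))

lemma fold_min (cond : String → Bool) (ks : List String) (b : Option String) (m : String)
    (hm : m ∈ ks) (hc : cond m = true)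
    (hb : ∀ t, b = some t → PySem.Str.len m < PySem.Str.len t)
    (hall : ∀ k ∈ ks, cond k = true → k = m ∨ PySem.Str.len m < PySem.Str.len k) :
    ks.foldl (fun best k => if cond k && improves k best then some k else best) b = some m := by
  induction ks generalizing b with
  | nil => simp at hm
  | cons k ks ih =>
    rw [List.foldl_cons]
    by_cases hk : k = m
    · subst hk
      have hck : (cond k && improves k b) = true := by
        rw [hc, Bool.true_and]
        cases b with
        | none => rfl
        | some t =>
          show decide (PySem.Str.len k < PySem.Str.len t) = true
          exact decide_eq_true (hb t rfl)
      rw [hck, if_pos rfl]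
      refine fold_keep cond ks k (fun k' hk' hck' => ?_)
      rcases hall k' (List.mem_cons_of_mem _ hk') hck' with h' | h'
      · rw [h']; omega
      · omega
    · have hm' : m ∈ ks := by
        cases List.mem_cons.mp hm with
        | inl h' => exact absurd h'.symm hk
        | inr h' => exact h'
      have hall' : ∀ k' ∈ ks, cond k' = true → k' = m ∨ PySem.Str.len m < PySem.Str.len k' :=
        fun k' hk' => hall k' (List.mem_cons_of_mem _ hk')
      cases hcb : cond k with
      | false =>
        rw [Bool.false_and]
        simp only [Bool.false_eq_true, if_false]
        exact ih b hm' hb hall'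
      | true =>
        rw [Bool.true_and]
        cases hib : improves k b with
        | false =>
          simp only [Bool.false_eq_true, if_false]
          exact ih b hm' hb hall'
        | true =>
          rw [if_pos rfl]
          refine ih (some k) hm' ?_ hall'
          intro u hu
          injection hu with hu
          subst hu
          rcases hall k (by simp) hcb with h' | h'
          · exact absurd h' hk
          · exact h'

lemma cond_iff (s k : String) :
    PySem.Str.startswith s (k ++ "-") = true ↔ (k.toList ++ ['-']) <+: s.toList := by
  have h0 : ("-" : String).toList = ['-'] := by decide
  have h1 : (k ++ ("-" : String)).toList = k.toList ++ ['-'] := by simp [h0]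
  rw [show PySem.Str.startswith s (k ++ "-") = PySem.Chars.startswith s.toList (k ++ "-").toList from by simp]
  rw [h1]
  exact PySem.Chars.startswith_iff _ _

lemma cand_eq (P : List (List Char)) (i : Nat) :
    PySem.Str.join "-" ((P.map String.ofList).take i) =
      String.ofList (PySem.Chars.join ['-'] (P.take i)) := by
  have h0 : ("-" : String).toList = ['-'] := by decide
  show String.ofList (PySem.Chars.join ("-" : String).toList
      (((P.map String.ofList).take i).map String.toList)) = _
  rw [h0, ← List.map_take, List.map_map]
  congr 1
  congr 1
  simp [Function.comp_def]

lemma len_ofList (L : List Char) : PySem.Str.len (String.ofList L) = L.length := by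
  simp [PySem.Str.len]

-- ===== VERDICT (by name: the statement is the Claim_ definition above) =====
theorem classify_host_py_spec : Claim_equal_classify_host_py := by
  intro s _
  unfold Spec_classify_host_py
  simp only [classify_host_py, classify_host_py_alt, splitOn_dash_eq]
  have hjoin : PySem.Chars.join ['-'] (mysplit [] s.toList) = s.toList := by
    simpa using join_mysplit [] s.toList
  have hfree : ∀ p ∈ mysplit [] s.toList, '-' ∉ p :=
    dash_free_mysplit [] s.toList (by simp)
  have hne : mysplit [] s.toList ≠ [] := mysplit_ne_nil [] s.toList
  have hhead : (mysplit [] s.toList).headD [] = s.toList.takeWhile (fun c => c != '-') := by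
    simpa using head_mysplit [] s.toList
  set P := mysplit [] s.toList with hPdef
  clear_value P
  by_cases hlen : 2 ≤ P.length
  · -- s has at least one dash
    rcases P with _ | ⟨p, Q⟩
    · simp at hlen
    have hlen' : 2 ≤ ((p :: Q).map String.ofList).length := by simpa using hlen
    rw [if_pos hlen']
    have hhostJ : (((p :: Q).map String.ofList).headD "") =
        String.ofList (PySem.Chars.join ['-'] ((p :: Q).take 1)) := by
      simp [PySem.Chars.join, List.intercalate]
    by_cases hex : ∃ i, 1 ≤ i ∧ i < (p :: Q).length ∧
        String.ofList (PySem.Chars.join ['-'] ((p :: Q).take i)) ∈ HOSTS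
    · -- some dash-boundary prefix is a known host
      obtain ⟨hi1, hi2, hmem⟩ := Nat.find_spec hex
      rw [fold_min (fun k => PySem.Str.startswith s (k ++ "-")) HOSTS none
        (String.ofList (PySem.Chars.join ['-'] ((p :: Q).take (Nat.find hex)))) hmem
        (by
          refine (cond_iff s _).mpr ?_
          rw [show (String.ofList (PySem.Chars.join ['-'] ((p :: Q).take (Nat.find hex)))).toList
              = PySem.Chars.join ['-'] ((p :: Q).take (Nat.find hex)) from by simp]
          rw [← hjoin]
          exact prefix_of_join _ _ (by omega) hi2)
        (by intro t ht; cases ht)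
        (by
          intro k hk hck
          have hpre := (cond_iff s k).mp hck
          rw [← hjoin] at hpre
          rcases join_of_prefix _ _ hfree hpre with ⟨i, h1, h2, h3⟩
          have hkofl : k = String.ofList (PySem.Chars.join ['-'] ((p :: Q).take i)) := by
            rw [← h3]; simp
          have hle : Nat.find hex ≤ i := Nat.find_le ⟨h1, h2, by rw [← hkofl]; exact hk⟩
          by_cases hii : i = Nat.find hex
          · left; rw [hkofl, hii]
          · right
            have hlt := join_take_len_lt (p :: Q) (Nat.find hex) i hi1 (by omega) (le_of_lt h2)
            rw [hkofl, len_ofList, len_ofList]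
            exact_mod_cast hlt)]
      by_cases hhost : HOST_METADATA.contains (((p :: Q).map String.ofList).headD "") = true
      · rw [if_pos hhost]
        have h1mem : String.ofList (PySem.Chars.join ['-'] ((p :: Q).take 1)) ∈ HOSTS := by
          rw [← hhostJ]; exact (contains_iff _).mp hhost
        have hfind1 : Nat.find hex ≤ 1 := Nat.find_le ⟨le_refl 1, lt_of_lt_of_le one_lt_two hlen, h1mem⟩
        have hi01 : Nat.find hex = 1 := le_antisymm hfind1 hi1
        rw [hhostJ, hi01]
      · rw [if_neg hhost]
        rw [classifyLoop_find ((p :: Q).map String.ofList) 1 (Nat.find hex) hi1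
          (by simpa using hi2)
          (by rw [cand_eq]; exact (contains_iff _).mpr hmem)
          (by
            intro j hj1 hj2
            rw [cand_eq]
            have hnot := Nat.find_min hex hj2
            refine Bool.eq_false_iff.mpr (fun hc => hnot ⟨hj1, by omega, (contains_iff _).mp hc⟩))]
        rw [cand_eq]
    · -- no dash-boundary prefix is a known host
      push Not at hex
      rw [fold_none (fun k => PySem.Str.startswith s (k ++ "-")) HOSTS none
        (by
          intro k hk
          refine Bool.eq_false_iff.mpr (fun hck => ?_)
          have hpre := (cond_iff s k).mp hck
          rw [← hjoin] at hpre
          rcases join_of_prefix _ _ hfree hpre with ⟨i, h1, h2, h3⟩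
          refine hex i h1 h2 ?_
          rw [← h3]
          simpa using hk)]
      have hhost : ¬ (HOST_METADATA.contains (((p :: Q).map String.ofList).headD "") = true) := by
        rw [hhostJ, contains_iff]
        exact hex 1 (le_refl 1) (lt_of_lt_of_le one_lt_two hlen)
      rw [if_neg hhost]
      rw [classifyLoop_none ((p :: Q).map String.ofList) 1
        (by
          intro j hj1 hj2
          rw [cand_eq]
          refine Bool.eq_false_iff.mpr (fun hc => ?_)
          exact hex j hj1 (by simpa using hj2) ((contains_iff _).mp hc))]
      simp only [List.headD_cons, List.map_cons]
      rw [show p = s.toList.takeWhile (fun c => c != '-') from by simpa using hhead]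
  · -- no dash in s: both fall through to the first segment
    have hlen' : ¬ (2 ≤ (P.map String.ofList).length) := by simpa using hlen
    rw [if_neg hlen']
    rw [fold_none (fun k => PySem.Str.startswith s (k ++ "-")) HOSTS none
      (by
        intro k hk
        refine Bool.eq_false_iff.mpr (fun hck => ?_)
        have hpre := (cond_iff s k).mp hck
        have hdash : '-' ∈ s.toList := hpre.subset (by simp)
        rcases P with _ | ⟨p, Q⟩
        · exact hne rfl
        rcases Q with _ | ⟨q, Q'⟩
        · have hps : p = s.toList := by simpa [PySem.Chars.join, List.intercalate] using hjoin
          exact hfree p (by simp) (hps ▸ hdash)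
        · simp at hlen)]
    rcases P with _ | ⟨p, Q⟩
    · exact absurd rfl hne
    · simp only [List.headD_cons, List.map_cons]
      rw [show p = s.toList.takeWhile (fun c => c != '-') from by simpa using hhead]
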